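-- pv_equiv track=rewrite | github.com/jerry955071/Workplace1136 | WoodyNano_1136/analyze_extra_exon_B.py | nth_extron_position
-- ===== SOURCE A (Python) =====
-- def nth_extron_position(extron_list, ref_start, n):
--     if n <= 0 or n > extron_list.__len__():
--         raise Exception(
--             'Extrons are counted from 1, 2,..., N; N is the numbers of extron')
--
--     if n == 1:
--         return ref_start, ref_start + extron_list[n-1] - 1
--
--     elif n <= extron_list.__len__():
--         last_end = nth_extron_position(extron_list, ref_start, n-1)[1] + 1
--         return last_end, last_end + extron_list[n-1] - 1
-- ===== SOURCE B (Python) =====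
-- def nth_extron_position(extron_list, ref_start, n):
--     if n <= 0 or n > len(extron_list):
--         raise Exception(
--             'Extrons are counted from 1, 2,..., N; N is the numbers of extron')
--     start = ref_start + sum(extron_list[:n-1])
--     return start, start + extron_list[n-1] - 1
-- ===== Notes on version B (the rewrite author's own statement) =====
-- stated objective: simpler
-- what changed: Replaced the one-call-per-exon recursion with a direct closed-form computation: start = ref_start + sum of the first n-1 exon lengths, end = start + length of the nth exon - 1.
import Mathlib
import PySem

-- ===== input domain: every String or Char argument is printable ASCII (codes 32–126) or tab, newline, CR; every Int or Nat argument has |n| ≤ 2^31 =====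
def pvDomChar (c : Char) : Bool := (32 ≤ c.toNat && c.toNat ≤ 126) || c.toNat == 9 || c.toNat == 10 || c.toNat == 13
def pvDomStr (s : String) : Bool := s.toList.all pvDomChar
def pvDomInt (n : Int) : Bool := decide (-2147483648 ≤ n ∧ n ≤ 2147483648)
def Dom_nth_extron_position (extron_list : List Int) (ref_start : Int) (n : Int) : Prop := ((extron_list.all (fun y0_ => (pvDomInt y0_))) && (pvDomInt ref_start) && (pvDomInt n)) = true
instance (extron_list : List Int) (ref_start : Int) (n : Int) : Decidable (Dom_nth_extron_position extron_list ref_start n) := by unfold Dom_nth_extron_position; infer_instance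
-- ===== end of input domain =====

-- B replaces A's per-exon recursion by a direct closed form (prefix sum); objective: simpler.

-- ===== PORT A =====
-- Literal port of A's recursion; on the inputs where A raises (n ≤ 0 or n > len),
-- excluded by Pre_, the port returns (0, 0).
def nth_extron_position (extron_list : List Int) (ref_start : Int) (n : Int) : Int × Int :=
  if n ≤ 0 ∨ n > (extron_list.length : Int) then (0, 0)
  else if n = 1 then
    (ref_start, ref_start + (PySem.List.pyGet? extron_list (n - 1)).getD 0 - 1)
  else
    let last_end := (nth_extron_position extron_list ref_start (n - 1)).2 + 1
    (last_end, last_end + (PySem.List.pyGet? extron_list (n - 1)).getD 0 - 1)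
termination_by n.toNat
decreasing_by omega

-- ===== PORT B =====
def nth_extron_position_alt (extron_list : List Int) (ref_start : Int) (n : Int) : Int × Int :=
  if n ≤ 0 ∨ n > (extron_list.length : Int) then (0, 0)
  else
    let start := ref_start + (PySem.List.slice extron_list none (some (n - 1))).sum
    (start, start + (PySem.List.pyGet? extron_list (n - 1)).getD 0 - 1)

-- ===== PRECONDITION & SPEC =====
-- Pre_ excludes exactly the inputs where A raises its Exception: n ≤ 0 or n > len.
def Pre_nth_extron_position (extron_list : List Int) (ref_start : Int) (n : Int) : Prop :=
  1 ≤ n ∧ n ≤ (extron_list.length : Int)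
instance (extron_list : List Int) (ref_start : Int) (n : Int) : Decidable (Pre_nth_extron_position extron_list ref_start n) := by unfold Pre_nth_extron_position; infer_instance

def pvWitness_nth_extron_position : List Int × Int × Int := ([3, 5, 2], 100, 2)

def Spec_nth_extron_position (extron_list : List Int) (ref_start : Int) (n : Int) (out : Int × Int) : Prop := out = nth_extron_position_alt extron_list ref_start n
instance (extron_list : List Int) (ref_start : Int) (n : Int) (out : Int × Int) : Decidable (Spec_nth_extron_position extron_list ref_start n out) := by unfold Spec_nth_extron_position; infer_instance

-- ===== CLAIM (what is proved, stated in full; the proofs are below) =====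
def Claim_equal_nth_extron_position : Prop := ∀ (extron_list : List Int) (ref_start : Int) (n : Int), Dom_nth_extron_position extron_list ref_start n → Pre_nth_extron_position extron_list ref_start n → Spec_nth_extron_position extron_list ref_start n (nth_extron_position extron_list ref_start n)

-- ===== LEMMAS AND PROOFS =====

-- Closed form of B on in-range inputs, stated over a Nat index k (n = k+1).
lemma alt_closed (l : List Int) (ref : Int) (k : Nat) (h : k < l.length) :
    nth_extron_position_alt l ref ((k : Int) + 1)
      = (ref + (l.take k).sum, ref + (l.take k).sum + l[k] - 1) := by
  unfold nth_extron_position_alt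
  rw [if_neg (by push_neg; omega)]
  have h1 : (k : Int) + 1 - 1 = (k : Int) := by omega
  rw [h1, PySem.List.slice_to_natCast, PySem.List.pyGet?_natCast,
      List.getElem?_eq_getElem h]
  rfl

-- A equals B's closed form, by induction on k (n = k+1).
lemma a_eq_alt (l : List Int) (ref : Int) (k : Nat) (h : k < l.length) :
    nth_extron_position l ref ((k : Int) + 1)
      = nth_extron_position_alt l ref ((k : Int) + 1) := by
  induction k with
  | zero =>
    rw [alt_closed l ref 0 h]
    unfold nth_extron_position
    rw [if_neg (by push_neg; omega), if_pos (by norm_num)]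
    norm_num [PySem.List.pyGet?_zero, List.getElem?_eq_getElem h]
  | succ k ih =>
    have hk : k < l.length := by omega
    rw [alt_closed l ref (k + 1) h]
    unfold nth_extron_position
    rw [if_neg (by push_neg; push_cast; omega), if_neg (by omega)]
    rw [show ((k + 1 : Nat) : Int) + 1 - 1 = (k : Int) + 1 from by push_cast; ring]
    rw [ih hk, alt_closed l ref k hk]
    rw [show ((k : Int) + 1) = ((k + 1 : Nat) : Int) from by push_cast; ring,
        PySem.List.pyGet?_natCast, List.getElem?_eq_getElem h]
    rw [List.sum_take_succ l k hk]
    simp only [Option.getD_some, Prod.mk.injEq]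
    constructor <;> ring

-- ===== VERDICT (by name: the statement is the Claim_ definition above) =====
theorem nth_extron_position_spec : Claim_equal_nth_extron_position := by
  intro l ref n _ hpre
  obtain ⟨h1, h2⟩ := hpre
  unfold Spec_nth_extron_position
  have hk : ∃ k : Nat, n = (k : Int) + 1 ∧ k < l.length := by
    refine ⟨(n - 1).toNat, by omega, by omega⟩
  obtain ⟨k, rfl, hk⟩ := hk
  exact a_eq_alt l ref k hk
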